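-- pv_equiv track=rewrite | github.com/malloydata/malloy-py | src/malloy/ipython/schema_view/__init__.py | field_sorter
-- ===== SOURCE A (Python) =====
-- def is_aggregate(field):
--   """
--   Identify aggregate fields by expressionType
--   """
--   return field.get("expressionType") in [
--       "aggregate", "scalar_analytic", "aggregate_analytic"
--       "ungrouped_aggregate"
--   ]
--
-- def field_sorter(fields):
--   """
--   Bucket fields into queries, dimensions, measures and structs
--   """
--   queries = []
--   dimensions = []
--   measures = []
--   structs = []
--
--   for field in fields:
--     field_type = field.get("type")
--
--     if is_aggregate(field):
--       measures.append(field)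
--     elif field_type == "turtle":
--       queries.append(field)
--     elif field_type == "struct":
--       structs.append(field)
--     else:
--       dimensions.append(field)
--
--   return [queries, dimensions, measures, structs]
-- ===== SOURCE B (Python) =====
-- def is_aggregate(field):
--   """
--   Identify aggregate fields by expressionType
--   """
--   return field.get("expressionType") in [
--       "aggregate", "scalar_analytic", "aggregate_analytic"
--       "ungrouped_aggregate"
--   ]
--
-- def field_sorter(fields):
--   """
--   Bucket fields into queries, dimensions, measures and structs,
--   one filtering pass per bucket.
--   """
--   queries = [f for f in fields
--              if not is_aggregate(f) and f.get("type") == "turtle"]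
--   dimensions = [f for f in fields
--                 if not is_aggregate(f) and f.get("type") not in ("turtle", "struct")]
--   measures = [f for f in fields if is_aggregate(f)]
--   structs = [f for f in fields
--              if not is_aggregate(f) and f.get("type") == "struct"]
--   return [queries, dimensions, measures, structs]
-- ===== Notes on version B (the rewrite author's own statement) =====
-- stated objective: alternative
-- what changed: Replaces the single loop with four mutating accumulators by four independent filtering passes over fields, one per bucket, with the elif priority encoded explicitly in each predicate (is_aggregate kept verbatim, including its concatenated-string quirk).
import Mathlib
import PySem

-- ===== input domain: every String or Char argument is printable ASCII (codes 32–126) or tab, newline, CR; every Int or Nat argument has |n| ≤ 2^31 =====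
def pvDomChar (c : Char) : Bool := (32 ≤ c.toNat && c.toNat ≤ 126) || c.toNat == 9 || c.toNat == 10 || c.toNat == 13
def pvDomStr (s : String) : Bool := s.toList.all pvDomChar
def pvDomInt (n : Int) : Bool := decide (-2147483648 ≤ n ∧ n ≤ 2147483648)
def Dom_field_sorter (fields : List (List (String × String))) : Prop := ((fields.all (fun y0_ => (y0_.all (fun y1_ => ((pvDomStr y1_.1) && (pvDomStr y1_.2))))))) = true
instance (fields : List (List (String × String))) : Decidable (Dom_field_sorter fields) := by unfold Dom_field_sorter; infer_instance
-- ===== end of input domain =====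

-- B replaces A's single accumulating loop by four independent filtering passes, one per bucket (alternative decomposition, same cost).

-- ===== PORT A =====
-- shared helper: is_aggregate, verbatim (note the Python source concatenates
-- "aggregate_analytic" "ungrouped_aggregate" into one string; ported exactly)
def is_aggregate (field : List (String × String)) : Bool :=
  match (PySem.Dict.mk field).get? "expressionType" with
  | some s => s == "aggregate" || s == "scalar_analytic" || s == "aggregate_analyticungrouped_aggregate"
  | none => false

-- the body of A's for-loop, one step over the four accumulators
def field_sorter_step
    (st : List (List (String × String)) × List (List (String × String)) × List (List (String × String)) × List (List (String × String)))
    (field : List (String × String)) :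
    List (List (String × String)) × List (List (String × String)) × List (List (String × String)) × List (List (String × String)) :=
  let (queries, dimensions, measures, structs) := st
  let field_type := (PySem.Dict.mk field).get? "type"
  if is_aggregate field then (queries, dimensions, measures ++ [field], structs)
  else if field_type == some "turtle" then (queries ++ [field], dimensions, measures, structs)
  else if field_type == some "struct" then (queries, dimensions, measures, structs ++ [field])
  else (queries, dimensions ++ [field], measures, structs)

def field_sorter (fields : List (List (String × String))) : List (List (List (String × String))) :=
  let st := fields.foldl field_sorter_step ([], [], [], [])
  [st.1, st.2.1, st.2.2.1, st.2.2.2]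

-- ===== PORT B =====
def field_sorter_alt (fields : List (List (String × String))) : List (List (List (String × String))) :=
  [fields.filter (fun f => !is_aggregate f && (PySem.Dict.mk f).get? "type" == some "turtle"),
   fields.filter (fun f => !is_aggregate f && !((PySem.Dict.mk f).get? "type" == some "turtle") && !((PySem.Dict.mk f).get? "type" == some "struct")),
   fields.filter (fun f => is_aggregate f),
   fields.filter (fun f => !is_aggregate f && (PySem.Dict.mk f).get? "type" == some "struct")]

-- ===== PRECONDITION & SPEC =====
def Spec_field_sorter (fields : List (List (String × String))) (out : List (List (List (String × String)))) : Prop := out = field_sorter_alt fields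
instance (fields : List (List (String × String))) (out : List (List (List (String × String)))) : Decidable (Spec_field_sorter fields out) := by unfold Spec_field_sorter; infer_instance

-- ===== CLAIM (what is proved, stated in full; the proofs are below) =====
def Claim_equal_field_sorter : Prop := ∀ (fields : List (List (String × String))), Dom_field_sorter fields → Spec_field_sorter fields (field_sorter fields)

-- ===== LEMMAS AND PROOFS =====
-- loop invariant: A's foldl extends each accumulator by the corresponding filtered bucket
theorem field_sorter_loop (fields : List (List (String × String)))
    (qs ds ms ss : List (List (String × String))) :
    fields.foldl field_sorter_step (qs, ds, ms, ss)
    = (qs ++ fields.filter (fun f => !is_aggregate f && (PySem.Dict.mk f).get? "type" == some "turtle"),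
       ds ++ fields.filter (fun f => !is_aggregate f && !((PySem.Dict.mk f).get? "type" == some "turtle") && !((PySem.Dict.mk f).get? "type" == some "struct")),
       ms ++ fields.filter (fun f => is_aggregate f),
       ss ++ fields.filter (fun f => !is_aggregate f && (PySem.Dict.mk f).get? "type" == some "struct")) := by
  induction fields generalizing qs ds ms ss with
  | nil => simp
  | cons f rest ih =>
    rw [List.foldl_cons]
    by_cases ha : is_aggregate f
    · rw [show field_sorter_step (qs, ds, ms, ss) f = (qs, ds, ms ++ [f], ss) by
        simp [field_sorter_step, ha], ih]
      simp [ha]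
    · by_cases ht : (PySem.Dict.mk f).get? "type" == some "turtle"
      · rw [show field_sorter_step (qs, ds, ms, ss) f = (qs ++ [f], ds, ms, ss) by
          simp only [field_sorter_step]; simp [ha, ht], ih]
        have heq : (PySem.Dict.mk f).get? "type" = some "turtle" := by
          exact beq_iff_eq.mp ht
        simp [ha, heq]
      · by_cases hs : (PySem.Dict.mk f).get? "type" == some "struct"
        · rw [show field_sorter_step (qs, ds, ms, ss) f = (qs, ds, ms, ss ++ [f]) by
            simp only [field_sorter_step]; simp [ha, ht, hs], ih]
          simp [ha, ht, hs]
        · rw [show field_sorter_step (qs, ds, ms, ss) f = (qs, ds ++ [f], ms, ss) by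
            simp only [field_sorter_step]; simp [ha, ht, hs], ih]
          simp [ha, ht, hs]

-- ===== VERDICT (by name: the statement is the Claim_ definition above) =====
theorem field_sorter_spec : Claim_equal_field_sorter := by
  intro fields _
  unfold Spec_field_sorter field_sorter field_sorter_alt
  rw [field_sorter_loop]
  simp
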